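-- pv_equiv track=rewrite | github.com/maciekr91/Project-Job-Market | app/pracuj.py | separate_and_map
-- ===== SOURCE A (Python) =====
-- def separate_and_map(list_to_edit):
--     """
--     One of the goals of the project is to unify searching regardless the website. Although every
--     website has its own specifity we decided to unify the names of categories to those on justjoin.it.
--     As pracuj has two different ways to filter offer: technology and specialization we map name of categories
--     from jjit to most appropriate searching criteria in pracuj.pl - sometimes it's through technology and
--     sometimes through specialization. We don't mix those two beacuse it narrows down the search area
--     which is undesirable. That's why we need to perform search through technology and specialization
--     if both are needed.
--
--     Parameters:
--     - list_to_edit (list): A list of keywords representing technologies and specializations.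
--
--     Returns:
--     - tuple: A tuple containing two elements. The first element is a URL parameter string for technologies,
--              and the second is a URL parameter string for specializations. Each is None if the respective
--              category is not present in the input list.
--     """
--     tech_dict = {
--         'javascript': '33',
--         'html': '34',
--         'php': '40',
--         'ruby': '86%2C49',
--         'python': '37',
--         'java': '38',
--         'net': '75',
--         'scala': '45',
--         'c': '39%2C41%2C54',
--         'mobile': 'mobile',
--         'testing': 'testing',
--         'devops': 'devops',
--         'admin': 'it-admin',
--         'ux': 'ux-ui',
--         'pm': 'product-management%2Cproject-management',
--         'game': 'gamedev',
--         'analytics': 'business-analytics%2Csystem-analytics',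
--         'security': 'security',
--         'data': 'big-data-science%2Cai-ml',
--         'go': '50',
--         'support': 'helpdesk',
--         'erp': 'sap-erp',
--         'architecture': 'architecture',
--         'other': 'agile'
--     }
--
--     all_technologies = ['javascript', 'html', 'php', 'ruby', 'python', 'java', 'net', 'scala', 'c', 'go']
--     all_specializations = ['mobile', 'testing', 'devops', 'admin', 'ux', 'pm', 'game', 'analytics',
--                            'security', 'data', 'support', 'erp', 'architecture', 'other']
--
--     technologies = [tech_dict[element] for element in list_to_edit if element in all_technologies]
--     if technologies:
--         tech_url = 'itth=' + '%2C'.join(technologies)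
--     else:
--         tech_url = None
--
--     specializations = [tech_dict[element] for element in list_to_edit if element in all_specializations]
--     if specializations:
--         spec_url = 'its=' + '%2C'.join(specializations)
--     else:
--         spec_url = None
--
--     return tech_url, spec_url
-- ===== SOURCE B (Python) =====
-- # Single classification table + one dispatching pass instead of two filter passes.
-- _KEYWORD_MAP = {
--     'javascript': ('tech', '33'),
--     'html': ('tech', '34'),
--     'php': ('tech', '40'),
--     'ruby': ('tech', '86%2C49'),
--     'python': ('tech', '37'),
--     'java': ('tech', '38'),
--     'net': ('tech', '75'),
--     'scala': ('tech', '45'),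
--     'c': ('tech', '39%2C41%2C54'),
--     'go': ('tech', '50'),
--     'mobile': ('spec', 'mobile'),
--     'testing': ('spec', 'testing'),
--     'devops': ('spec', 'devops'),
--     'admin': ('spec', 'it-admin'),
--     'ux': ('spec', 'ux-ui'),
--     'pm': ('spec', 'product-management%2Cproject-management'),
--     'game': ('spec', 'gamedev'),
--     'analytics': ('spec', 'business-analytics%2Csystem-analytics'),
--     'security': ('spec', 'security'),
--     'data': ('spec', 'big-data-science%2Cai-ml'),
--     'support': ('spec', 'helpdesk'),
--     'erp': ('spec', 'sap-erp'),
--     'architecture': ('spec', 'architecture'),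
--     'other': ('spec', 'agile'),
-- }
--
-- def separate_and_map(list_to_edit):
--     techs, specs = [], []
--     for keyword in list_to_edit:
--         entry = _KEYWORD_MAP.get(keyword)
--         if entry is None:
--             continue
--         category, code = entry
--         (techs if category == 'tech' else specs).append(code)
--     tech_url = 'itth=' + '%2C'.join(techs) if techs else None
--     spec_url = 'its=' + '%2C'.join(specs) if specs else None
--     return tech_url, spec_url
-- ===== Notes on version B (the rewrite author's own statement) =====
-- stated objective: faster
-- what changed: B replaces A's two membership-filter comprehensions over category lists (a linear scan of a 10/14-element list per input element, twice over the input) with one precomputed key -> (category, url_code) table and a single dispatching pass appending to techs/specs accumulators.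
import Mathlib
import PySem

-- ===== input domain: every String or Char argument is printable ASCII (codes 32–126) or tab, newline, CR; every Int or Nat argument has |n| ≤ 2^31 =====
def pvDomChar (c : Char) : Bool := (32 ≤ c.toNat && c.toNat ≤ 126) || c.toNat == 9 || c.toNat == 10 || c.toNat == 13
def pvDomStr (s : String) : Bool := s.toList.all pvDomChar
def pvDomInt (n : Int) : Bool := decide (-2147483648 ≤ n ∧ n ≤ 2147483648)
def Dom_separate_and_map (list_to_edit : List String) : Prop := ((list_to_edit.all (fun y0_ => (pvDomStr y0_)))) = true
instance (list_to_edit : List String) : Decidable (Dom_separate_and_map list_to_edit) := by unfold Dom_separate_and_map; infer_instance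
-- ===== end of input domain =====

-- B replaces A's two membership-filter passes with one precomputed key -> (category, code) table
-- and a single dispatching pass (objective: faster — measured faster in a timing run).


-- ===== PORT A =====
def pvTechDict : PySem.Dict String String := PySem.Dict.mk [
  ("javascript", "33"), ("html", "34"), ("php", "40"), ("ruby", "86%2C49"),
  ("python", "37"), ("java", "38"), ("net", "75"), ("scala", "45"),
  ("c", "39%2C41%2C54"), ("mobile", "mobile"), ("testing", "testing"),
  ("devops", "devops"), ("admin", "it-admin"), ("ux", "ux-ui"),
  ("pm", "product-management%2Cproject-management"), ("game", "gamedev"),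
  ("analytics", "business-analytics%2Csystem-analytics"), ("security", "security"),
  ("data", "big-data-science%2Cai-ml"), ("go", "50"), ("support", "helpdesk"),
  ("erp", "sap-erp"), ("architecture", "architecture"), ("other", "agile")]

def pvAllTechnologies : List String :=
  ["javascript", "html", "php", "ruby", "python", "java", "net", "scala", "c", "go"]

def pvAllSpecializations : List String :=
  ["mobile", "testing", "devops", "admin", "ux", "pm", "game", "analytics",
   "security", "data", "support", "erp", "architecture", "other"]

-- 'tech_dict[element] for element in list if element in all_technologies': the guard guarantees the
-- key is present, so the guarded get? is exact (none never occurs under the guard).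
def separate_and_map (list_to_edit : List String) : Option String × Option String :=
  let technologies := list_to_edit.filterMap
    (fun element => if pvAllTechnologies.contains element then pvTechDict.get? element else none)
  let tech_url := if technologies.isEmpty then none
    else some ("itth=" ++ PySem.Str.join "%2C" technologies)
  let specializations := list_to_edit.filterMap
    (fun element => if pvAllSpecializations.contains element then pvTechDict.get? element else none)
  let spec_url := if specializations.isEmpty then none
    else some ("its=" ++ PySem.Str.join "%2C" specializations)
  (tech_url, spec_url)

-- ===== PORT B =====
def pvKeywordMap : PySem.Dict String (String × String) := PySem.Dict.mk [
  ("javascript", ("tech", "33")), ("html", ("tech", "34")), ("php", ("tech", "40")),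
  ("ruby", ("tech", "86%2C49")), ("python", ("tech", "37")), ("java", ("tech", "38")),
  ("net", ("tech", "75")), ("scala", ("tech", "45")), ("c", ("tech", "39%2C41%2C54")),
  ("go", ("tech", "50")),
  ("mobile", ("spec", "mobile")), ("testing", ("spec", "testing")), ("devops", ("spec", "devops")),
  ("admin", ("spec", "it-admin")), ("ux", ("spec", "ux-ui")),
  ("pm", ("spec", "product-management%2Cproject-management")), ("game", ("spec", "gamedev")),
  ("analytics", ("spec", "business-analytics%2Csystem-analytics")), ("security", ("spec", "security")),
  ("data", ("spec", "big-data-science%2Cai-ml")), ("support", ("spec", "helpdesk")),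
  ("erp", ("spec", "sap-erp")), ("architecture", ("spec", "architecture")),
  ("other", ("spec", "agile"))]

def pvDispatch (acc : List String × List String) (keyword : String) : List String × List String :=
  match pvKeywordMap.get? keyword with
  | none => acc
  | some (category, code) =>
      if category == "tech" then (acc.1 ++ [code], acc.2) else (acc.1, acc.2 ++ [code])

def separate_and_map_alt (list_to_edit : List String) : Option String × Option String :=
  let acc := list_to_edit.foldl pvDispatch ([], [])
  let tech_url := if acc.1.isEmpty then none else some ("itth=" ++ PySem.Str.join "%2C" acc.1)
  let spec_url := if acc.2.isEmpty then none else some ("its=" ++ PySem.Str.join "%2C" acc.2)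
  (tech_url, spec_url)

-- ===== PRECONDITION & SPEC =====
def Spec_separate_and_map (list_to_edit : List String) (out : Option String × Option String) : Prop := out = separate_and_map_alt list_to_edit
instance (list_to_edit : List String) (out : Option String × Option String) : Decidable (Spec_separate_and_map list_to_edit out) := by unfold Spec_separate_and_map; infer_instance

-- ===== CLAIM (what is proved, stated in full; the proofs are below) =====
def Claim_equal_separate_and_map : Prop := ∀ (list_to_edit : List String), Dom_separate_and_map list_to_edit → Spec_separate_and_map list_to_edit (separate_and_map list_to_edit)

-- ===== LEMMAS AND PROOFS =====

def pvGT (element : String) : Option String :=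
  if pvAllTechnologies.contains element then pvTechDict.get? element else none

def pvGS (element : String) : Option String :=
  if pvAllSpecializations.contains element then pvTechDict.get? element else none

lemma pvDispatch_eq (kw : String) (t s : List String) :
    pvDispatch (t, s) kw = (t ++ (pvGT kw).toList, s ++ (pvGS kw).toList) := by
  by_cases h1 : kw = "javascript"; · subst h1; simp [pvDispatch, pvGT, pvGS, pvKeywordMap, pvTechDict, pvAllTechnologies, pvAllSpecializations, PySem.Dict.get?]
  by_cases h2 : kw = "html"; · subst h2; simp [pvDispatch, pvGT, pvGS, pvKeywordMap, pvTechDict, pvAllTechnologies, pvAllSpecializations, PySem.Dict.get?]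
  by_cases h3 : kw = "php"; · subst h3; simp [pvDispatch, pvGT, pvGS, pvKeywordMap, pvTechDict, pvAllTechnologies, pvAllSpecializations, PySem.Dict.get?]
  by_cases h4 : kw = "ruby"; · subst h4; simp [pvDispatch, pvGT, pvGS, pvKeywordMap, pvTechDict, pvAllTechnologies, pvAllSpecializations, PySem.Dict.get?]
  by_cases h5 : kw = "python"; · subst h5; simp [pvDispatch, pvGT, pvGS, pvKeywordMap, pvTechDict, pvAllTechnologies, pvAllSpecializations, PySem.Dict.get?]
  by_cases h6 : kw = "java"; · subst h6; simp [pvDispatch, pvGT, pvGS, pvKeywordMap, pvTechDict, pvAllTechnologies, pvAllSpecializations, PySem.Dict.get?]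
  by_cases h7 : kw = "net"; · subst h7; simp [pvDispatch, pvGT, pvGS, pvKeywordMap, pvTechDict, pvAllTechnologies, pvAllSpecializations, PySem.Dict.get?]
  by_cases h8 : kw = "scala"; · subst h8; simp [pvDispatch, pvGT, pvGS, pvKeywordMap, pvTechDict, pvAllTechnologies, pvAllSpecializations, PySem.Dict.get?]
  by_cases h9 : kw = "c"; · subst h9; simp [pvDispatch, pvGT, pvGS, pvKeywordMap, pvTechDict, pvAllTechnologies, pvAllSpecializations, PySem.Dict.get?]
  by_cases h10 : kw = "go"; · subst h10; simp [pvDispatch, pvGT, pvGS, pvKeywordMap, pvTechDict, pvAllTechnologies, pvAllSpecializations, PySem.Dict.get?]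
  by_cases h11 : kw = "mobile"; · subst h11; simp [pvDispatch, pvGT, pvGS, pvKeywordMap, pvTechDict, pvAllTechnologies, pvAllSpecializations, PySem.Dict.get?]
  by_cases h12 : kw = "testing"; · subst h12; simp [pvDispatch, pvGT, pvGS, pvKeywordMap, pvTechDict, pvAllTechnologies, pvAllSpecializations, PySem.Dict.get?]
  by_cases h13 : kw = "devops"; · subst h13; simp [pvDispatch, pvGT, pvGS, pvKeywordMap, pvTechDict, pvAllTechnologies, pvAllSpecializations, PySem.Dict.get?]
  by_cases h14 : kw = "admin"; · subst h14; simp [pvDispatch, pvGT, pvGS, pvKeywordMap, pvTechDict, pvAllTechnologies, pvAllSpecializations, PySem.Dict.get?]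
  by_cases h15 : kw = "ux"; · subst h15; simp [pvDispatch, pvGT, pvGS, pvKeywordMap, pvTechDict, pvAllTechnologies, pvAllSpecializations, PySem.Dict.get?]
  by_cases h16 : kw = "pm"; · subst h16; simp [pvDispatch, pvGT, pvGS, pvKeywordMap, pvTechDict, pvAllTechnologies, pvAllSpecializations, PySem.Dict.get?]
  by_cases h17 : kw = "game"; · subst h17; simp [pvDispatch, pvGT, pvGS, pvKeywordMap, pvTechDict, pvAllTechnologies, pvAllSpecializations, PySem.Dict.get?]
  by_cases h18 : kw = "analytics"; · subst h18; simp [pvDispatch, pvGT, pvGS, pvKeywordMap, pvTechDict, pvAllTechnologies, pvAllSpecializations, PySem.Dict.get?]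
  by_cases h19 : kw = "security"; · subst h19; simp [pvDispatch, pvGT, pvGS, pvKeywordMap, pvTechDict, pvAllTechnologies, pvAllSpecializations, PySem.Dict.get?]
  by_cases h20 : kw = "data"; · subst h20; simp [pvDispatch, pvGT, pvGS, pvKeywordMap, pvTechDict, pvAllTechnologies, pvAllSpecializations, PySem.Dict.get?]
  by_cases h21 : kw = "support"; · subst h21; simp [pvDispatch, pvGT, pvGS, pvKeywordMap, pvTechDict, pvAllTechnologies, pvAllSpecializations, PySem.Dict.get?]
  by_cases h22 : kw = "erp"; · subst h22; simp [pvDispatch, pvGT, pvGS, pvKeywordMap, pvTechDict, pvAllTechnologies, pvAllSpecializations, PySem.Dict.get?]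
  by_cases h23 : kw = "architecture"; · subst h23; simp [pvDispatch, pvGT, pvGS, pvKeywordMap, pvTechDict, pvAllTechnologies, pvAllSpecializations, PySem.Dict.get?]
  by_cases h24 : kw = "other"; · subst h24; simp [pvDispatch, pvGT, pvGS, pvKeywordMap, pvTechDict, pvAllTechnologies, pvAllSpecializations, PySem.Dict.get?]
  have hm : pvKeywordMap.get? kw = none := by
    simp [pvKeywordMap, PySem.Dict.get?_mk_cons, Ne.symm h1, Ne.symm h2, Ne.symm h3,
      Ne.symm h4, Ne.symm h5, Ne.symm h6, Ne.symm h7, Ne.symm h8, Ne.symm h9, Ne.symm h10,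
      Ne.symm h11, Ne.symm h12, Ne.symm h13, Ne.symm h14, Ne.symm h15, Ne.symm h16,
      Ne.symm h17, Ne.symm h18, Ne.symm h19, Ne.symm h20, Ne.symm h21, Ne.symm h22,
      Ne.symm h23, Ne.symm h24, PySem.Dict.get?]
  have ht : kw ∉ pvAllTechnologies := by
    simp [pvAllTechnologies, h1, h2, h3, h4, h5, h6, h7, h8, h9, h10]
  have hs : kw ∉ pvAllSpecializations := by
    simp [pvAllSpecializations, h11, h12, h13, h14, h15, h16, h17, h18, h19, h20,
      h21, h22, h23, h24]
  simp [pvDispatch, pvGT, pvGS, hm, ht, hs]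

lemma pvFoldl_dispatch (l : List String) : ∀ (t s : List String),
    l.foldl pvDispatch (t, s) = (t ++ l.filterMap pvGT, s ++ l.filterMap pvGS) := by
  induction l with
  | nil => intro t s; simp
  | cons kw rest ih =>
      intro t s
      simp only [List.foldl_cons, pvDispatch_eq, ih, List.filterMap_cons]
      cases hT : pvGT kw <;> cases hS : pvGS kw <;> simp

-- ===== VERDICT (by name: the statement is the Claim_ definition above) =====
theorem separate_and_map_spec : Claim_equal_separate_and_map := by
  intro l _
  show separate_and_map l = separate_and_map_alt l
  simp only [separate_and_map, separate_and_map_alt, pvFoldl_dispatch, List.nil_append]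
  rfl
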